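-- pv_equiv track=rewrite | github.com/miguelartazos/Final-Presentation-RCEL-506 | src/board_autobalancer.py | _industry_replacement
-- ===== SOURCE A (Python) =====
-- VALID_INDUSTRIES = ("Service", "Food", "Retail", "Professional", "Tech", "Real Estate", "Trades")
--
-- def _industry_replacement(face_affinities: tuple[str, str], industry_counts: dict[str, int]) -> str | None:
--     options = [
--         industry
--         for industry in VALID_INDUSTRIES
--         if industry not in face_affinities
--     ]
--     if not options:
--         return None
--     options.sort(key=lambda industry: (industry_counts.get(industry, 0), industry))
--     return options[0]
-- ===== SOURCE B (Python) =====
-- VALID_INDUSTRIES = ("Service", "Food", "Retail", "Professional", "Tech", "Real Estate", "Trades")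
--
-- def _industry_replacement(face_affinities: tuple[str, str], industry_counts: dict[str, int]) -> str | None:
--     best = None
--     best_key = None
--     for industry in VALID_INDUSTRIES:
--         if industry in face_affinities:
--             continue
--         key = (industry_counts.get(industry, 0), industry)
--         if best is None or key < best_key:
--             best, best_key = industry, key
--     return best
-- ===== Notes on version B (the rewrite author's own statement) =====
-- stated objective: idiomatic
-- what changed: Replaced building an options list, sorting it by (count, name) and taking element 0 with a single linear scan over VALID_INDUSTRIES that keeps the running minimum (count, name) key, skipping affinity matches inline; no intermediate list and no sort.
import Mathlib
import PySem

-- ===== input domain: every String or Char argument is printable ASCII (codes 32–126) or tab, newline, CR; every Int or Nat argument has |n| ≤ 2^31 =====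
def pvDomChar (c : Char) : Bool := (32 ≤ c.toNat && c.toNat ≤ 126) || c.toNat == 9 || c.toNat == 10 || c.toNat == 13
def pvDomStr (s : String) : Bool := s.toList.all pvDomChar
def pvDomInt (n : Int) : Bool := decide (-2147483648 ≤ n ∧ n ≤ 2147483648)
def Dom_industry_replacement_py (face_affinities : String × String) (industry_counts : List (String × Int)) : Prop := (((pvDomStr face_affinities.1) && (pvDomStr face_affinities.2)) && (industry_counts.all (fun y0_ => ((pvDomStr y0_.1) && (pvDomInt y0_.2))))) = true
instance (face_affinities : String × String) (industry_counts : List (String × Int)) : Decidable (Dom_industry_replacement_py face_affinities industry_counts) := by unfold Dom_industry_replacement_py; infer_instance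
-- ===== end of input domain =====

-- B replaces build-list + sort-by-(count,name) + take-first with one linear scan keeping the running minimum key (idiomatic min-selection; same result).

-- ===== PORT A =====
def pvValidIndustries : List String :=
  ["Service", "Food", "Retail", "Professional", "Tech", "Real Estate", "Trades"]

-- Python tuple key (count, industry) compared lexicographically → toLex on Int × String
def industry_replacement_py (face_affinities : String × String) (industry_counts : List (String × Int)) : Option String :=
  let options := pvValidIndustries.filter
    (fun industry => !(industry == face_affinities.1 || industry == face_affinities.2))
  if options.isEmpty then none
  else (PySem.List.sorted options
          (fun industry => toLex (PySem.Dict.getD (PySem.Dict.mk industry_counts) industry (0 : Int), industry)) false).head?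

-- ===== PORT B =====
-- one step of B's loop: skip affinity matches, otherwise keep the smaller (count, name) key
def irAltStep (face_affinities : String × String) (industry_counts : List (String × Int))
    (best : Option String) (industry : String) : Option String :=
  if industry == face_affinities.1 || industry == face_affinities.2 then best
  else
    match best with
    | none => some industry
    | some b =>
      if PySem.Dict.getD (PySem.Dict.mk industry_counts) industry (0 : Int) < PySem.Dict.getD (PySem.Dict.mk industry_counts) b (0 : Int) ∨
         (PySem.Dict.getD (PySem.Dict.mk industry_counts) industry (0 : Int) = PySem.Dict.getD (PySem.Dict.mk industry_counts) b (0 : Int) ∧ industry < b)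
      then some industry else some b

def industry_replacement_py_alt (face_affinities : String × String) (industry_counts : List (String × Int)) : Option String :=
  pvValidIndustries.foldl (irAltStep face_affinities industry_counts) none

-- ===== PRECONDITION & SPEC =====
def Spec_industry_replacement_py (face_affinities : String × String) (industry_counts : List (String × Int)) (out : Option String) : Prop := out = industry_replacement_py_alt face_affinities industry_counts
instance (face_affinities : String × String) (industry_counts : List (String × Int)) (out : Option String) : Decidable (Spec_industry_replacement_py face_affinities industry_counts out) := by unfold Spec_industry_replacement_py; infer_instance

-- ===== CLAIM (what is proved, stated in full; the proofs are below) =====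
def Claim_equal_industry_replacement_py : Prop := ∀ (face_affinities : String × String) (industry_counts : List (String × Int)), Dom_industry_replacement_py face_affinities industry_counts → Spec_industry_replacement_py face_affinities industry_counts (industry_replacement_py face_affinities industry_counts)

-- ===== LEMMAS AND PROOFS =====

-- the pure min-selection step (B's step after the affinity filter is factored out)
def pvMinStep (industry_counts : List (String × Int)) (best : Option String) (industry : String) : Option String :=
  match best with
  | none => some industry
  | some b =>
    if PySem.Dict.getD (PySem.Dict.mk industry_counts) industry (0 : Int) < PySem.Dict.getD (PySem.Dict.mk industry_counts) b (0 : Int) ∨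
       (PySem.Dict.getD (PySem.Dict.mk industry_counts) industry (0 : Int) = PySem.Dict.getD (PySem.Dict.mk industry_counts) b (0 : Int) ∧ industry < b)
    then some industry else some b

def pvKey (industry_counts : List (String × Int)) (industry : String) : Lex (Int × String) :=
  toLex (PySem.Dict.getD (PySem.Dict.mk industry_counts) industry (0 : Int), industry)

lemma pvMinStep_some (industry_counts : List (String × Int)) (b i : String) :
    pvMinStep industry_counts (some b) i =
      if pvKey industry_counts i < pvKey industry_counts b then some i else some b := by
  simp only [pvMinStep, pvKey, Prod.Lex.lt_iff, ofLex_toLex]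

lemma pvKey_inj (industry_counts : List (String × Int)) :
    Function.Injective (pvKey industry_counts) := by
  intro a b h
  have := congrArg (fun x => (ofLex x).2) h
  simpa [pvKey] using this

-- folding pvMinStep from `some a` yields an element of a::xs whose key is ≤ every key in a::xs
lemma pvFold_min (industry_counts : List (String × Int)) :
    ∀ (xs : List String) (a : String),
      ∃ b, xs.foldl (pvMinStep industry_counts) (some a) = some b ∧
        b ∈ a :: xs ∧ ∀ y ∈ a :: xs, pvKey industry_counts b ≤ pvKey industry_counts y := by
  intro xs
  induction xs with
  | nil =>
    intro a
    exact ⟨a, rfl, by simp, by simp⟩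
  | cons x t ih =>
    intro a
    by_cases h : pvKey industry_counts x < pvKey industry_counts a
    · obtain ⟨b, hb, hmem, hmin⟩ := ih x
      refine ⟨b, ?_, ?_, ?_⟩
      · rw [List.foldl_cons, pvMinStep_some, if_pos h]; exact hb
      · rcases List.mem_cons.mp hmem with h1 | h1 <;> simp [h1]
      · intro y hy
        rcases List.mem_cons.mp hy with h1 | hy2
        · rw [h1]
          exact le_of_lt (lt_of_le_of_lt (hmin x (by simp)) h)
        · rcases List.mem_cons.mp hy2 with h1 | h1
          · rw [h1]; exact hmin x (by simp)
          · exact hmin y (by simp [h1])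
    · obtain ⟨b, hb, hmem, hmin⟩ := ih a
      refine ⟨b, ?_, ?_, ?_⟩
      · rw [List.foldl_cons, pvMinStep_some, if_neg h]; exact hb
      · rcases List.mem_cons.mp hmem with h1 | h1 <;> simp [h1]
      · intro y hy
        rcases List.mem_cons.mp hy with h1 | hy2
        · rw [h1]; exact hmin a (by simp)
        · rcases List.mem_cons.mp hy2 with h1 | h1
          · rw [h1]
            exact le_trans (hmin a (by simp)) (not_lt.mp h)
          · exact hmin y (by simp [h1])

-- head of the stable sort equals the fold-min selection (keys are injective)
lemma pvSortedHead_eq_fold (industry_counts : List (String × Int)) (xs : List String) :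
    (PySem.List.sorted xs (pvKey industry_counts) false).head? =
      xs.foldl (pvMinStep industry_counts) none := by
  cases xs with
  | nil =>
    simp [PySem.List.sorted]
  | cons a t =>
    obtain ⟨b, hb, hmem, hmin⟩ := pvFold_min industry_counts t a
    have hfold : (a :: t).foldl (pvMinStep industry_counts) none = some b := by
      simpa [List.foldl_cons, pvMinStep] using hb
    rw [hfold]
    cases hs : PySem.List.sorted (a :: t) (pvKey industry_counts) false with
    | nil =>
      have := PySem.List.sorted_perm (a :: t) (pvKey industry_counts) false
      rw [hs] at this
      exact absurd this.symm (by simp)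
    | cons m s =>
      have hm_mem : m ∈ a :: t := by
        have : m ∈ PySem.List.sorted (a :: t) (pvKey industry_counts) false := by simp [hs]
        exact (PySem.List.mem_sorted _ _ _ _).mp this
      have h1 : pvKey industry_counts m ≤ pvKey industry_counts b :=
        PySem.List.key_head_sorted_le (a :: t) (pvKey industry_counts) hs b hmem
      have h2 : pvKey industry_counts b ≤ pvKey industry_counts m := hmin m hm_mem
      have : m = b := pvKey_inj industry_counts (le_antisymm h1 h2)
      simp [this]

-- ===== VERDICT (by name: the statement is the Claim_ definition above) =====
theorem industry_replacement_py_spec : Claim_equal_industry_replacement_py := by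
  intro fa industry_counts _
  unfold Spec_industry_replacement_py industry_replacement_py industry_replacement_py_alt
  have hfol : pvValidIndustries.foldl (irAltStep fa industry_counts) none
      = (pvValidIndustries.filter (fun i => !(i == fa.1 || i == fa.2))).foldl (pvMinStep industry_counts) none := by
    rw [List.foldl_filter]
    congr 1
    funext best i
    by_cases h : (i == fa.1 || i == fa.2) <;> simp [irAltStep, pvMinStep, h]
  rw [hfol]
  show (if (pvValidIndustries.filter (fun industry => !(industry == fa.1 || industry == fa.2))).isEmpty then none
        else (PySem.List.sorted (pvValidIndustries.filter (fun industry => !(industry == fa.1 || industry == fa.2)))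
          (fun industry => toLex (PySem.Dict.getD (PySem.Dict.mk industry_counts) industry (0 : Int), industry)) false).head?) = _
  by_cases h : (pvValidIndustries.filter (fun industry => !(industry == fa.1 || industry == fa.2))).isEmpty
  · rw [if_pos h]
    rw [List.isEmpty_iff] at h
    rw [h]
    rfl
  · rw [if_neg h]
    exact pvSortedHead_eq_fold industry_counts _
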